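-- pv_equiv track=rewrite | github.com/adixsyukri/data_ingest_utils | workflow/transform-files-full/files-full-parquet.py | process
-- ===== SOURCE A (Python) =====
-- def process(record,schema):
--     split_text = []
--     if schema == 'OSM':
--         d = "1-"
--         for i,e in enumerate(record.split("\n1-")):
--             if i > 0:
--                 split_text.append(d+e)
--             else:
--                 split_text.append(e)
--     else:
--         split_text = [row for row in record.split("\n") if row]
--     return split_text
-- ===== SOURCE B (Python) =====
-- def process(record, schema):
--     if schema == 'OSM':
--         lines = record.split("\n")
--         groups = []
--         cur = lines[0]
--         for line in lines[1:]:
--             if line.startswith("1-"):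
--                 groups.append(cur)
--                 cur = line
--             else:
--                 cur = cur + "\n" + line
--         groups.append(cur)
--         return groups
--     return [row for row in record.split("\n") if row]
-- ===== Notes on version B (the rewrite author's own statement) =====
-- stated objective: alternative
-- what changed: The OSM branch no longer splits on the compound delimiter "\n1-" and re-prepends "1-" by index; it splits into plain lines and rebuilds the segments in one marker-grouping pass (a new group starts at each line beginning with "1-").
import Mathlib
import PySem

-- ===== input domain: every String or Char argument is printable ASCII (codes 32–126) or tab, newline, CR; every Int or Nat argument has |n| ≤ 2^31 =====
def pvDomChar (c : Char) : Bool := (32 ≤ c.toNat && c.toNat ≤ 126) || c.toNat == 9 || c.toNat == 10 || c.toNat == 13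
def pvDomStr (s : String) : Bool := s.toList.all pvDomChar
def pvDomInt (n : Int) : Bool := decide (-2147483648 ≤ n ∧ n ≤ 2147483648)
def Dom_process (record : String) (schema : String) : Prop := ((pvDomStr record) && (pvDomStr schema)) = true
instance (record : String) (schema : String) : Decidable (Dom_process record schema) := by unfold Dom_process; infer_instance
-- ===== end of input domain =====

-- B rebuilds the OSM segments by one marker-grouping pass over plain "\n" lines instead of
-- splitting on the compound delimiter "\n1-" and re-prepending "1-" by index (objective: alternative).

-- ===== PORT A =====
-- record.split("\n1-") / record.split("\n"): sep is a non-empty literal, so split? is always `some`; .getD [] only discharges the Option.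
def process (record : String) (schema : String) : List String :=
  if schema == "OSM" then
    let d := "1-"
    (PySem.List.enumerate ((PySem.Str.split? record "\n1-").getD [])).foldl
      (fun split_text ie => if ie.1 > 0 then split_text ++ [d ++ ie.2] else split_text ++ [ie.2]) []
  else
    ((PySem.Str.split? record "\n").getD []).filter (fun row => row != "")

-- ===== PORT B =====
-- Source B: lines = record.split("\n") is never empty, so the [] arm of the match is unreachable (lines[0] cannot raise).
def process_alt (record : String) (schema : String) : List String :=
  if schema == "OSM" then
    match (PySem.Str.split? record "\n").getD [] with
    | [] => []
    | l0 :: ls =>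
      let st := ls.foldl
        (fun (st : List String × String) line =>
          if PySem.Str.startswith line "1-" then (st.1 ++ [st.2], line)
          else (st.1, st.2 ++ "\n" ++ line)) ([], l0)
      st.1 ++ [st.2]
  else
    ((PySem.Str.split? record "\n").getD []).filter (fun row => row != "")

-- ===== PRECONDITION & SPEC =====
def Spec_process (record : String) (schema : String) (out : List String) : Prop := out = process_alt record schema
instance (record : String) (schema : String) (out : List String) : Decidable (Spec_process record schema out) := by unfold Spec_process; infer_instance

-- ===== CLAIM (what is proved, stated in full; the proofs are below) =====
def Claim_equal_process : Prop := ∀ (record : String) (schema : String), Dom_process record schema → Spec_process record schema (process record schema)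

-- ===== LEMMAS AND PROOFS =====

-- clean structural form of Python's str.split(sep) for a non-empty separator c0 :: sep
def pvConsHead (c : Char) : List (List Char) → List (List Char)
  | [] => [[c]]
  | p :: ps => (c :: p) :: ps

def pvSplit (c0 : Char) (sep : List Char) : List Char → List (List Char)
  | [] => [[]]
  | c :: rest =>
    if (c0 :: sep).isPrefixOf (c :: rest) then
      [] :: pvSplit c0 sep (List.drop sep.length rest)
    else
      pvConsHead c (pvSplit c0 sep rest)
termination_by cs => cs.length
decreasing_by all_goals simp

theorem pvSplit_ne_nil (c0 : Char) (sep : List Char) (cs : List Char) : pvSplit c0 sep cs ≠ [] := by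
  cases cs with
  | nil => simp [pvSplit]
  | cons c rest =>
    rw [pvSplit]
    split
    · simp
    · cases pvSplit c0 sep rest <;> simp [pvConsHead]

theorem pvGo_spec (c0 : Char) (sep : List Char) (fuel : Nat) :
    ∀ (l cur : List Char) (acc : List (List Char)), l.length < fuel →
      PySem.Chars.splitOn.go (c0 :: sep) fuel l cur acc =
        acc.reverse ++ (pvSplit c0 sep l).modifyHead (cur.reverse ++ ·) := by
  induction fuel with
  | zero => intro l cur acc h; omega
  | succ n ih =>
    intro l cur acc h
    cases l with
    | nil => simp [PySem.Chars.splitOn.go, pvSplit]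
    | cons c rest =>
      rw [pvSplit]
      by_cases hp : (c0 :: sep).isPrefixOf (c :: rest) = true
      · simp only [PySem.Chars.splitOn.go, hp, if_true]
        rw [ih (List.drop (c0 :: sep).length (c :: rest)) [] (cur.reverse :: acc)
            (by simp at h ⊢; omega)]
        simp [List.modifyHead]
        cases hps : pvSplit c0 sep (List.drop sep.length rest) with
        | nil => exact absurd hps (pvSplit_ne_nil _ _ _)
        | cons p ps => simp
      · simp only [PySem.Chars.splitOn.go, hp, if_false]
        rw [ih rest (c :: cur) acc (by simp at h ⊢; omega)]
        cases hps : pvSplit c0 sep rest with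
        | nil => exact absurd hps (pvSplit_ne_nil _ _ _)
        | cons p ps => simp [pvConsHead, List.modifyHead]

theorem pvSplitOn_eq (c0 : Char) (sep : List Char) (cs : List Char) :
    PySem.Chars.splitOn cs (c0 :: sep) = pvSplit c0 sep cs := by
  have h := pvGo_spec c0 sep (cs.length + 1) cs [] [] (by omega)
  simp only [PySem.Chars.splitOn] at *
  rw [h]
  cases hps : pvSplit c0 sep cs with
  | nil => exact absurd hps (pvSplit_ne_nil _ _ _)
  | cons p ps => simp [List.modifyHead]

-- A's OSM loop on the char-list level: first piece kept, "1-" re-prepended to the rest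
def pvMapA : List (List Char) → List (List Char)
  | [] => []
  | p :: ps => p :: ps.map (['1', '-'] ++ ·)

-- B's OSM grouping loop on the char-list level
def pvBgr (cur : List Char) : List (List Char) → List (List Char)
  | [] => [cur]
  | l :: ls => if ['1', '-'].isPrefixOf l then cur :: pvBgr l ls else pvBgr (cur ++ '\n' :: l) ls

def pvBgrTop : List (List Char) → List (List Char)
  | [] => []
  | l :: ls => pvBgr l ls

theorem pvBgr_prepend (p : List Char) : ∀ (ls : List (List Char)) (cur : List Char),
    pvBgr (p ++ cur) ls = (pvBgr cur ls).modifyHead (p ++ ·) := by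
  intro ls
  induction ls with
  | nil => intro cur; simp [pvBgr, List.modifyHead]
  | cons l ls ih =>
    intro cur
    simp only [pvBgr]
    split
    · simp [List.modifyHead]
    · have hx := ih (cur ++ '\n' :: l)
      rw [← List.append_assoc] at hx
      exact hx

theorem pvPref_takeWhile (cs : List Char) :
    ['1', '-'].isPrefixOf (cs.takeWhile (· ≠ '\n')) = ['1', '-'].isPrefixOf cs := by
  cases cs with
  | nil => rfl
  | cons a cs' =>
    by_cases ha : a = '\n'
    · subst ha; simp [List.isPrefixOf]
    · by_cases hb : a = '1'
      · subst hb
        cases cs' with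
        | nil => simp [List.isPrefixOf, ha]
        | cons b cs'' =>
          by_cases hc : b = '\n'
          · subst hc; simp [List.isPrefixOf, ha]
          · simp [List.isPrefixOf, ha, hc]
      · have hba : ('1' == a) = false := beq_eq_false_iff_ne.mpr (Ne.symm hb)
        simp [ha, List.isPrefixOf, hba]

theorem pvHead_pvSplit (cs : List Char) :
    (pvSplit '\n' [] cs).headD [] = cs.takeWhile (· ≠ '\n') := by
  induction hn : cs.length using Nat.strong_induction_on generalizing cs with
  | _ n ih =>
    cases cs with
    | nil => simp [pvSplit]
    | cons c rest =>
      rw [pvSplit]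
      by_cases hc : c = '\n'
      · subst hc
        simp [List.isPrefixOf, List.takeWhile]
      · have : (['\n'] : List Char).isPrefixOf (c :: rest) = false := by
          simp [List.isPrefixOf]; exact fun h => absurd h.symm hc
        simp only [this, Bool.false_eq_true, if_false]
        cases hps : pvSplit '\n' [] rest with
        | nil => exact absurd hps (pvSplit_ne_nil _ _ _)
        | cons p ps =>
          have hr := ih rest.length (by subst hn; simp) rest rfl
          rw [hps] at hr
          simp only [List.headD] at hr
          simp [pvConsHead, List.takeWhile, hc, hr]

-- the heart of the equivalence: grouping "\n"-lines at "1-" markers rebuilds the "\n1-" split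
theorem pvMain : ∀ (cs : List Char),
    pvBgrTop (pvSplit '\n' [] cs) = pvMapA (pvSplit '\n' ['1', '-'] cs) := by
  intro cs
  induction hn : cs.length using Nat.strong_induction_on generalizing cs with
  | _ n ih =>
    cases cs with
    | nil => simp [pvSplit, pvBgrTop, pvBgr, pvMapA]
    | cons c rest =>
      subst hn
      have hIH := ih rest.length (by simp) rest rfl
      cases hq : pvSplit '\n' ['1', '-'] rest with
      | nil => exact absurd hq (pvSplit_ne_nil _ _ _)
      | cons q0 qs =>
      cases hl : pvSplit '\n' [] rest with
      | nil => exact absurd hl (pvSplit_ne_nil _ _ _)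
      | cons h0 t =>
      rw [hq, hl] at hIH
      simp only [pvBgrTop, pvMapA] at hIH
      by_cases hc : c = '\n'
      · subst hc
        by_cases hp : ['1', '-'].isPrefixOf rest = true
        · -- full separator "\n1-" present here
          obtain ⟨rest3, hrest⟩ : ∃ rest3, rest = '1' :: '-' :: rest3 := by
            cases rest with
            | nil => simp [List.isPrefixOf] at hp
            | cons a r2 =>
              cases r2 with
              | nil => simp [List.isPrefixOf] at hp
              | cons b r3 =>
                simp [List.isPrefixOf] at hp
                exact ⟨r3, by rw [← hp.1, ← hp.2]⟩
          subst hrest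
          have h3 : pvSplit '\n' ['1', '-'] ('\n' :: '1' :: '-' :: rest3) =
              [] :: pvSplit '\n' ['1', '-'] rest3 := by
            rw [pvSplit]; simp [List.isPrefixOf]
          have h1 : pvSplit '\n' [] ('\n' :: '1' :: '-' :: rest3) =
              [] :: pvConsHead '1' (pvConsHead '-' (pvSplit '\n' [] rest3)) := by
            rw [pvSplit]; simp only [List.isPrefixOf, List.length_nil, List.drop_zero,
              beq_self_eq_true, Bool.true_and, if_true]
            rw [pvSplit]; simp only [List.isPrefixOf]
            rw [pvSplit]; simp only [List.isPrefixOf]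
            simp
          cases hq3 : pvSplit '\n' ['1', '-'] rest3 with
          | nil => exact absurd hq3 (pvSplit_ne_nil _ _ _)
          | cons r0 rs =>
          cases hl3 : pvSplit '\n' [] rest3 with
          | nil => exact absurd hl3 (pvSplit_ne_nil _ _ _)
          | cons g0 gt =>
          have hIH3 := ih rest3.length (by simp; omega) rest3 rfl
          rw [hq3, hl3] at hIH3
          simp only [pvBgrTop, pvMapA] at hIH3
          rw [h1, h3, hq3]
          simp only [pvBgrTop, pvConsHead, pvMapA, pvBgr, hl3]
          have hpref : ['1', '-'].isPrefixOf ('1' :: '-' :: g0) = true := by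
            simp [List.isPrefixOf]
          rw [hpref]
          simp only [if_true]
          have hsplit : ('1' :: '-' :: g0) = ['1', '-'] ++ g0 := rfl
          rw [hsplit, pvBgr_prepend, hIH3]
          simp [List.modifyHead]
        · -- a bare "\n" separator: a new line that does not start a new segment
          have hpre1 : pvSplit '\n' [] ('\n' :: rest) = [] :: pvSplit '\n' [] rest := by
            rw [pvSplit]; simp [List.isPrefixOf]
          have hpre3 : pvSplit '\n' ['1', '-'] ('\n' :: rest) =
              pvConsHead '\n' (pvSplit '\n' ['1', '-'] rest) := by
            rw [pvSplit]
            have : (['\n', '1', '-'] : List Char).isPrefixOf ('\n' :: rest) =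
                ['1', '-'].isPrefixOf rest := by simp [List.isPrefixOf]
            rw [this]
            simp [hp]
          have hh0 : ['1', '-'].isPrefixOf h0 = false := by
            have := pvHead_pvSplit rest
            rw [hl] at this
            simp only [List.headD] at this
            rw [this, pvPref_takeWhile]
            exact Bool.eq_false_iff.mpr hp
          rw [hpre1, hpre3, hq, hl]
          simp only [pvBgrTop, pvConsHead, pvMapA, pvBgr, hh0]
          simp only [Bool.false_eq_true, if_false]
          have : ('\n' :: h0) = ['\n'] ++ h0 := rfl
          rw [List.nil_append, this, pvBgr_prepend, hIH]
          simp [List.modifyHead]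
      · -- c is not a newline: c is glued onto the head of both splits
        have hpre1 : pvSplit '\n' [] (c :: rest) = pvConsHead c (pvSplit '\n' [] rest) := by
          rw [pvSplit]
          have : (['\n'] : List Char).isPrefixOf (c :: rest) = false := by
            simp [List.isPrefixOf]; exact fun h => absurd h.symm hc
          rw [this]; simp
        have hpre3 : pvSplit '\n' ['1', '-'] (c :: rest) =
            pvConsHead c (pvSplit '\n' ['1', '-'] rest) := by
          rw [pvSplit]
          have : (['\n', '1', '-'] : List Char).isPrefixOf (c :: rest) = false := by
            simp [List.isPrefixOf]; exact fun h => absurd h.symm hc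
          rw [this]; simp
        rw [hpre1, hpre3, hq, hl]
        simp only [pvBgrTop, pvConsHead, pvMapA]
        have : (c :: h0) = [c] ++ h0 := rfl
        rw [this, pvBgr_prepend, hIH]
        simp [List.modifyHead]

-- string-level images of pvMapA / pvBgr
def pvMapAStr : List String → List String
  | [] => []
  | p :: ps => p :: ps.map ("1-" ++ ·)

def pvBgrStr (cur : String) : List String → List String
  | [] => [cur]
  | l :: ls => if PySem.Str.startswith l "1-" then cur :: pvBgrStr l ls else pvBgrStr (cur ++ "\n" ++ l) ls

theorem pvAFold (xs : List String) : ∀ (acc : List String) (s : Int), 0 < s →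
    (PySem.List.enumerate xs s).foldl
      (fun split_text ie => if ie.1 > 0 then split_text ++ ["1-" ++ ie.2] else split_text ++ [ie.2]) acc =
      acc ++ xs.map ("1-" ++ ·) := by
  induction xs with
  | nil => intro acc s _; simp [PySem.List.enumerate_nil]
  | cons x xs ih =>
    intro acc s hs
    rw [PySem.List.enumerate_cons]
    simp only [List.foldl_cons]
    rw [if_pos (by simpa using hs), ih (acc ++ ["1-" ++ x]) (s + 1) (by omega)]
    simp

theorem pvATop (xs : List String) :
    (PySem.List.enumerate xs).foldl
      (fun split_text ie => if ie.1 > 0 then split_text ++ ["1-" ++ ie.2] else split_text ++ [ie.2]) [] =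
      pvMapAStr xs := by
  cases xs with
  | nil => simp [PySem.List.enumerate_nil, pvMapAStr]
  | cons x xs =>
    rw [PySem.List.enumerate_cons]
    simp only [List.foldl_cons]
    rw [if_neg (by simp), pvAFold xs ([] ++ [x]) (0 + 1) (by omega)]
    simp [pvMapAStr]

theorem pvBFold (ls : List String) : ∀ (gs : List String) (cur : String),
    (ls.foldl
        (fun (st : List String × String) line =>
          if PySem.Str.startswith line "1-" then (st.1 ++ [st.2], line)
          else (st.1, st.2 ++ "\n" ++ line)) (gs, cur)).1 ++
      [(ls.foldl
        (fun (st : List String × String) line =>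
          if PySem.Str.startswith line "1-" then (st.1 ++ [st.2], line)
          else (st.1, st.2 ++ "\n" ++ line)) (gs, cur)).2] = gs ++ pvBgrStr cur ls := by
  induction ls with
  | nil => intro gs cur; simp [pvBgrStr]
  | cons l ls ih =>
    intro gs cur
    simp only [List.foldl_cons, pvBgrStr]
    by_cases hs : PySem.Str.startswith l "1-" = true
    · rw [if_pos hs, if_pos hs, ih (gs ++ [cur]) l]
      simp
    · rw [if_neg hs, if_neg hs]
      exact ih gs (cur ++ "\n" ++ l)

theorem pvMapAStr_map (l : List (List Char)) :
    pvMapAStr (l.map String.ofList) = (pvMapA l).map String.ofList := by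
  cases l with
  | nil => rfl
  | cons p ps =>
    simp only [List.map_cons, pvMapAStr, pvMapA]
    congr 1
    simp only [List.map_map]
    apply List.map_congr_left
    intro x _
    show "1-" ++ String.ofList x = String.ofList (['1', '-'] ++ x)
    rw [String.ofList_append]

theorem pvBgrStr_map (t : List (List Char)) : ∀ (h : List Char),
    pvBgrStr (String.ofList h) (t.map String.ofList) = (pvBgr h t).map String.ofList := by
  induction t with
  | nil => intro h; simp [pvBgrStr, pvBgr]
  | cons l ls ih =>
    intro h
    simp only [List.map_cons, pvBgrStr, pvBgr]
    have hsw : PySem.Str.startswith (String.ofList l) "1-" = ['1', '-'].isPrefixOf l := by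
      rw [PySem.Str.startswith_eq]
      simp [PySem.Chars.startswith]
    rw [hsw]
    by_cases hp : ['1', '-'].isPrefixOf l = true
    · rw [if_pos hp, if_pos hp]
      simp [ih l]
    · rw [if_neg hp, if_neg hp]
      have : String.ofList h ++ "\n" ++ String.ofList l = String.ofList (h ++ '\n' :: l) := by
        rw [show (h ++ '\n' :: l) = h ++ ['\n'] ++ l by simp, String.ofList_append, String.ofList_append]
      rw [this, ih (h ++ '\n' :: l)]

-- ===== VERDICT (by name: the statement is the Claim_ definition above) =====
theorem process_spec : Claim_equal_process := by
  unfold Claim_equal_process Spec_process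
  intro record schema _
  unfold process process_alt
  by_cases hsch : (schema == "OSM") = true
  · rw [if_pos hsch, if_pos hsch]
    simp only [PySem.Str.split?, PySem.Chars.split?]
    have hsep3 : ("\n1-").toList = ('\n' :: ['1', '-'] : List Char) := rfl
    have hsep1 : ("\n").toList = ('\n' :: [] : List Char) := rfl
    rw [hsep3, hsep1, pvSplitOn_eq, pvSplitOn_eq]
    simp only [List.isEmpty_cons, Bool.false_eq_true, if_false, Option.map_some, Option.getD_some]
    rw [pvATop, pvMapAStr_map, ← pvMain]
    cases hl : pvSplit '\n' [] record.toList with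
    | nil => exact absurd hl (pvSplit_ne_nil _ _ _)
    | cons l0 ls =>
      simp only [List.map_cons]
      rw [pvBFold (ls.map String.ofList) [] (String.ofList l0), pvBgrStr_map ls l0]
      simp [pvBgrTop]
  · rw [if_neg hsch, if_neg hsch]
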